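-- pv_equiv track=rewrite | github.com/vamseeachanta/workspace-hub | scripts/data/doc_intelligence/table_quality.py | meets_content_threshold
-- ===== SOURCE A (Python) =====
-- MIN_DATA_ROWS = 3
--
-- MIN_NUMERIC_COLUMNS = 2
--
-- def _is_numeric(value: str) -> bool:
--     """Check if a string looks like a number."""
--     v = value.strip().strip('"').strip("'")
--     if not v:
--         return False
--     # Handle common numeric patterns: 1.23, -4.5, 0.150, 10000, 1.5e3
--     v = v.replace(",", "")  # strip thousand separators
--     try:
--         float(v)
--         return True
--     except ValueError:
--         return False
--
-- def meets_content_threshold(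
--     table: dict,
--     min_data_rows: int = MIN_DATA_ROWS,
--     min_numeric_cols: int = MIN_NUMERIC_COLUMNS,
-- ) -> bool:
--     """Check if table has enough real content: ≥min_data_rows non-empty rows
--     and ≥min_numeric_cols columns with numeric values."""
--     rows = table.get("rows", [])
--
--     # Count non-empty rows (at least one non-empty cell)
--     data_rows = [r for r in rows if any(str(c).strip() for c in r)]
--     if len(data_rows) < min_data_rows:
--         return False
--
--     # Count columns with numeric values
--     if not data_rows:
--         return False
--
--     max_cols = max(len(r) for r in data_rows)
--     numeric_col_count = 0
--
--     for col_idx in range(max_cols):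
--         numeric_in_col = 0
--         total_in_col = 0
--         for row in data_rows:
--             if col_idx < len(row):
--                 cell = str(row[col_idx]).strip()
--                 if cell:
--                     total_in_col += 1
--                     if _is_numeric(cell):
--                         numeric_in_col += 1
--         # Column is numeric if ≥50% of non-empty cells are numbers
--         if total_in_col > 0 and numeric_in_col / total_in_col >= 0.5:
--             numeric_col_count += 1
--
--     return numeric_col_count >= min_numeric_cols
-- ===== SOURCE B (Python) =====
-- MIN_DATA_ROWS = 3
--
-- MIN_NUMERIC_COLUMNS = 2
--
-- def _is_numeric(value: str) -> bool:
--     """Check if a string looks like a number."""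
--     v = value.strip().strip('"').strip("'")
--     if not v:
--         return False
--     v = v.replace(",", "")  # strip thousand separators
--     try:
--         float(v)
--         return True
--     except ValueError:
--         return False
--
-- def meets_content_threshold(
--     table: dict,
--     min_data_rows: int = MIN_DATA_ROWS,
--     min_numeric_cols: int = MIN_NUMERIC_COLUMNS,
-- ) -> bool:
--     """Single row-major pass: accumulate per-column (total, numeric) tallies,
--     then count columns whose non-empty cells are >=50% numeric."""
--     rows = table.get("rows", [])
--
--     data_rows = [r for r in rows if any(str(c).strip() for c in r)]
--     if len(data_rows) < min_data_rows:
--         return False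
--     if not data_rows:
--         return False
--
--     # one pass over the data: tallies[j] = [total non-empty, numeric] for column j
--     tallies = []
--     for row in data_rows:
--         j = 0
--         for c in row:
--             cell = str(c).strip()
--             if cell:
--                 if len(tallies) <= j:
--                     tallies.extend([0, 0] for _ in range(j + 1 - len(tallies)))
--                 t = tallies[j]
--                 t[0] += 1
--                 if _is_numeric(cell):
--                     t[1] += 1
--             j += 1
--
--     # a column is numeric if >=50% of its non-empty cells are numbers
--     numeric_col_count = sum(1 for t, n in tallies if t > 0 and 2 * n >= t)
--     return numeric_col_count >= min_numeric_cols
-- ===== Notes on version B (the rewrite author's own statement) =====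
-- stated objective: alternative
-- what changed: A recomputes each column's (total, numeric) pair with a full inner pass over all rows for every column index; B makes one row-major pass that accumulates a growable per-column tally list and then counts qualifying columns in a single scan of that list.
import Mathlib
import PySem

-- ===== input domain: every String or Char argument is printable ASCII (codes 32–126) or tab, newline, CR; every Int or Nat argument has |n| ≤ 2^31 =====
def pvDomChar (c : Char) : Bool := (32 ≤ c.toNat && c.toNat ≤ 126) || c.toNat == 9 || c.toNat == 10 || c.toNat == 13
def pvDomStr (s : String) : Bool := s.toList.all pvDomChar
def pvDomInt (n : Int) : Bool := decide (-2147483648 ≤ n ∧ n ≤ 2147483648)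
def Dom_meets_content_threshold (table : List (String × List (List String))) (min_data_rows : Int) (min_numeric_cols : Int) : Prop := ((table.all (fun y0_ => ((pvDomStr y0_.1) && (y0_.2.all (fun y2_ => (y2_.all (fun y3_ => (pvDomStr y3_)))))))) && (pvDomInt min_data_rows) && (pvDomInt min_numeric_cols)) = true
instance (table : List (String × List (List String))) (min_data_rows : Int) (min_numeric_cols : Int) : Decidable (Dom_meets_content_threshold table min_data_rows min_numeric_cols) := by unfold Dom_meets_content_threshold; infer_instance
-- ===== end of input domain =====

-- B replaces A's column-major nested rescans (for each column index, a full pass over all rows)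
-- by ONE row-major pass that accumulates a per-column (total, numeric) tally table, then a scan
-- of that table; same return value (objective: alternative decomposition, no speed claim).

-- ===== PORT A =====
-- Validator for Python's float(v) literal syntax (success/failure only), exact for the
-- printable-ASCII + tab/newline/CR strings of the domain: optional whitespace and sign,
-- inf/infinity/nan (case-insensitive) or digits/'.'/exponent with single '_' between digits.
def pvSkipWs : List Char → List Char
  | [] => []
  | c :: cs => if c = ' ' ∨ c = '\t' ∨ c = '\n' ∨ c = '\r' then pvSkipWs cs else c :: cs

-- continues a digit run: digit (('_')? digit)* (already past the first digit)
def pvDigRun : List Char → List Char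
  | '_' :: c :: cs => if c.isDigit then pvDigRun cs else '_' :: c :: cs
  | c :: cs => if c.isDigit then pvDigRun cs else c :: cs
  | [] => []

-- consumes a digit run (at least one digit); none if no leading digit
def pvDigits? : List Char → Option (List Char)
  | c :: cs => if c.isDigit then some (pvDigRun cs) else none
  | [] => none

def pvSignSkip : List Char → List Char
  | c :: cs => if c = '+' ∨ c = '-' then cs else c :: cs
  | [] => []

-- digits ['.' digits?] | '.' digits
def pvMantissa? (cs : List Char) : Option (List Char) :=
  match pvDigits? cs with
  | some r =>
    match r with
    | '.' :: r2 => some ((pvDigits? r2).getD r2)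
    | _ => some r
  | none =>
    match cs with
    | '.' :: r2 => pvDigits? r2
    | _ => none

def pvExp? : List Char → Option (List Char)
  | c :: r => if c = 'e' ∨ c = 'E' then pvDigits? (pvSignSkip r) else some (c :: r)
  | [] => some []

def pvFloatOk (s : List Char) : Bool :=
  let cs := pvSignSkip (pvSkipWs s)
  let low := cs.map PySem.Chars.lowerChar
  if low.take 8 = "infinity".toList then (pvSkipWs (cs.drop 8)).isEmpty
  else if low.take 3 = "inf".toList then (pvSkipWs (cs.drop 3)).isEmpty
  else if low.take 3 = "nan".toList then (pvSkipWs (cs.drop 3)).isEmpty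
  else
    match pvMantissa? cs with
    | none => false
    | some r1 =>
      match pvExp? r1 with
      | none => false
      | some r2 => (pvSkipWs r2).isEmpty

-- _is_numeric(value): strip whitespace then '"' then "'", reject empty, drop ',', try float
def pvIsNumeric (value : List Char) : Bool :=
  let v := PySem.Chars.stripChars (PySem.Chars.stripChars (PySem.Chars.strip value) ['"']) ['\'']
  if v = [] then false
  else pvFloatOk (PySem.Chars.replace v [','] [])

-- A's inner loop: (total_in_col, numeric_in_col) for one column index
def pvAInner (R : List (List String)) (col_idx : Int) : Int × Int :=
  R.foldl (fun (p : Int × Int) row =>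
    if col_idx < (row.length : Int) then
      if ¬ (PySem.Chars.strip (PySem.List.pyGetD row col_idx "").toList).isEmpty then
        (p.1 + 1,
         if pvIsNumeric (PySem.Chars.strip (PySem.List.pyGetD row col_idx "").toList) then p.2 + 1
         else p.2)
      else p
    else p) (0, 0)

-- A's outer loop over range(max_cols); the test numeric/total >= 0.5 is ported exactly as
-- 2*numeric >= total (counts are far below any float-precision threshold)
def pvACount (R : List (List String)) (max_cols : Int) : Int :=
  (PySem.List.pyRange 0 max_cols 1).foldl (fun acc col_idx =>
    let p := pvAInner R col_idx
    if p.1 > 0 ∧ 2 * p.2 ≥ p.1 then acc + 1 else acc) 0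

def meets_content_threshold (table : List (String × List (List String))) (min_data_rows : Int) (min_numeric_cols : Int) : Bool :=
  let rows := PySem.Dict.getD (PySem.Dict.mk table) "rows" []
  let data_rows := rows.filter (fun r => r.any (fun c => !(PySem.Chars.strip c.toList).isEmpty))
  if (data_rows.length : Int) < min_data_rows then false
  else if data_rows.isEmpty then false
  else
    let max_cols := (PySem.List.max? (data_rows.map (fun r => (r.length : Int))) (fun x => x)).getD 0
    decide (pvACount data_rows max_cols ≥ min_numeric_cols)

-- ===== PORT B =====
-- grow the tally list to cover index j, then bump (total, numeric) at j
def pvBump (T : List (Int × Int)) (j : Nat) (isNum : Bool) : List (Int × Int) :=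
  let T' := T ++ List.replicate (j + 1 - T.length) ((0 : Int), (0 : Int))
  T'.modify j (fun p => (p.1 + 1, if isNum then p.2 + 1 else p.2))

-- B's inner loop: fold one row (with its running column index) into the tallies
def pvProcRow (T : List (Int × Int)) (r : List String) : List (Int × Int) :=
  (r.foldl (fun (s : List (Int × Int) × Nat) c =>
      (if ¬ (PySem.Chars.strip c.toList).isEmpty then
         pvBump s.1 s.2 (pvIsNumeric (PySem.Chars.strip c.toList))
       else s.1,
       s.2 + 1))
    (T, 0)).1

-- B's final scan of the tally table (same 2*numeric >= total ratio test as A's port)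
def pvBCount (tallies : List (Int × Int)) : Int :=
  tallies.foldl (fun acc p => if p.1 > 0 ∧ 2 * p.2 ≥ p.1 then acc + 1 else acc) 0

def meets_content_threshold_alt (table : List (String × List (List String))) (min_data_rows : Int) (min_numeric_cols : Int) : Bool :=
  let rows := PySem.Dict.getD (PySem.Dict.mk table) "rows" []
  let data_rows := rows.filter (fun r => r.any (fun c => !(PySem.Chars.strip c.toList).isEmpty))
  if (data_rows.length : Int) < min_data_rows then false
  else if data_rows.isEmpty then false
  else
    let tallies := data_rows.foldl pvProcRow []
    decide (pvBCount tallies ≥ min_numeric_cols)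

-- ===== PRECONDITION & SPEC =====
def Spec_meets_content_threshold (table : List (String × List (List String))) (min_data_rows : Int) (min_numeric_cols : Int) (out : Bool) : Prop := out = meets_content_threshold_alt table min_data_rows min_numeric_cols
instance (table : List (String × List (List String))) (min_data_rows : Int) (min_numeric_cols : Int) (out : Bool) : Decidable (Spec_meets_content_threshold table min_data_rows min_numeric_cols out) := by unfold Spec_meets_content_threshold; infer_instance

-- ===== CLAIM (what is proved, stated in full; the proofs are below) =====
def Claim_equal_meets_content_threshold : Prop := ∀ (table : List (String × List (List String))) (min_data_rows : Int) (min_numeric_cols : Int), Dom_meets_content_threshold table min_data_rows min_numeric_cols → Spec_meets_content_threshold table min_data_rows min_numeric_cols (meets_content_threshold table min_data_rows min_numeric_cols)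

-- ===== LEMMAS AND PROOFS =====

def pvCell (r : List String) (j : Nat) : List Char := PySem.Chars.strip (r.getD j "").toList
def pvTotP (j : Nat) (r : List String) : Bool := decide (j < r.length) && !(pvCell r j).isEmpty
def pvNumP (j : Nat) (r : List String) : Bool := pvTotP j r && pvIsNumeric (pvCell r j)
def pvTot (R : List (List String)) (j : Nat) : Nat := R.countP (pvTotP j)
def pvNum (R : List (List String)) (j : Nat) : Nat := R.countP (pvNumP j)

lemma pvAInner_aux (j : Nat) (R : List (List String)) (a b : Int) :
    R.foldl (fun (p : Int × Int) row =>
      if ((j : Nat) : Int) < (row.length : Int) then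
        if ¬ (PySem.Chars.strip (PySem.List.pyGetD row ((j : Nat) : Int) "").toList).isEmpty then
          (p.1 + 1,
           if pvIsNumeric (PySem.Chars.strip (PySem.List.pyGetD row ((j : Nat) : Int) "").toList) then p.2 + 1
           else p.2)
        else p
      else p) (a, b) = (a + (pvTot R j : Int), b + (pvNum R j : Int)) := by
  induction R generalizing a b with
  | nil => simp [pvTot, pvNum]
  | cons r R ih =>
    simp only [List.foldl_cons]
    by_cases hl : j < r.length
    · rw [if_pos (by exact_mod_cast hl)]
      rw [PySem.List.pyGetD_natCast]
      have hc : PySem.Chars.strip (r.getD j "").toList = pvCell r j := rfl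
      rw [hc]
      by_cases he : (pvCell r j).isEmpty
      · rw [if_neg (by simpa using he), ih]
        have hT : pvTotP j r = false := by simp [pvTotP, List.isEmpty_iff.mp he]
        have hN : pvNumP j r = false := by simp [pvNumP, hT]
        simp [pvTot, pvNum, List.countP_cons, hT, hN]
      · rw [if_pos (by simpa using he)]
        have hT : pvTotP j r = true := by simp [pvTotP, hl]; simpa using he
        by_cases hn : pvIsNumeric (pvCell r j)
        · rw [if_pos hn, ih]
          have hN : pvNumP j r = true := by simp [pvNumP, hT, hn]
          simp only [pvTot, pvNum, List.countP_cons, hT, hN]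
          simp only [Prod.mk.injEq, if_true]
          constructor <;> push_cast <;> ring
        · rw [if_neg hn, ih]
          have hN : pvNumP j r = false := by simp [pvNumP, hn]
          simp only [pvTot, pvNum, List.countP_cons, hT, hN]
          simp only [Prod.mk.injEq, if_true, if_false]
          constructor <;> push_cast <;> ring
    · rw [if_neg (by exact_mod_cast hl)]
      rw [ih]
      have hT : pvTotP j r = false := by simp [pvTotP, hl]
      have hN : pvNumP j r = false := by simp [pvNumP, hT]
      simp [pvTot, pvNum, List.countP_cons, hT, hN]

lemma pvAInner_eq (R : List (List String)) (j : Nat) :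
    pvAInner R ((j : Nat) : Int) = ((pvTot R j : Int), (pvNum R j : Int)) := by
  have := pvAInner_aux j R 0 0
  simpa [pvAInner] using this
lemma pvACount_eq (R : List (List String)) (M : Nat) :
    pvACount R ((M : Nat) : Int)
      = ((List.range M).countP (fun j => decide (0 < pvTot R j ∧ pvTot R j ≤ 2 * pvNum R j)) : Int) := by
  unfold pvACount
  rw [show PySem.List.pyRange 0 ((M : Nat) : Int) 1 = (List.range M).map (fun k => ((k : Nat) : Int)) from PySem.List.pyRange_zero_natCast M]
  rw [List.foldl_map]
  simp only [pvAInner_eq]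
  rw [PySem.List.foldl_ite_add_one (fun j => ((pvTot R j : Int), (pvNum R j : Int)).1 > 0 ∧ 2 * ((pvTot R j : Int), (pvNum R j : Int)).2 ≥ ((pvTot R j : Int), (pvNum R j : Int)).1) (List.range M) 0]
  norm_num
  congr 1
  funext j
  congr 1
  exact decide_eq_decide.mpr (by omega)
def pvRowAdd (r : List String) (j : Nat) : Int × Int :=
  ((if pvTotP j r then 1 else 0), (if pvNumP j r then 1 else 0))

lemma pvPad_getD (T : List (Int × Int)) (n i : Nat) :
    (T ++ List.replicate n ((0 : Int), (0 : Int))).getD i (0, 0) = T.getD i (0, 0) := by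
  simp only [List.getD_eq_getElem?_getD, List.getElem?_append, List.getElem?_replicate]
  split_ifs with h1 h2
  · rfl
  · rw [List.getElem?_eq_none (show T.length ≤ i by omega)]
    rfl
  · rw [List.getElem?_eq_none (show T.length ≤ i by omega)]

lemma pvBump_getD (T : List (Int × Int)) (j : Nat) (b : Bool) (i : Nat) :
    (pvBump T j b).getD i (0, 0) =
      if i = j then ((T.getD j (0, 0)).1 + 1, if b then (T.getD j (0, 0)).2 + 1 else (T.getD j (0, 0)).2)
      else T.getD i (0, 0) := by
  unfold pvBump
  set X := T ++ List.replicate (j + 1 - T.length) ((0 : Int), (0 : Int)) with hX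
  have hlen : j < X.length := by
    simp [hX, List.length_append, List.length_replicate]; omega
  rw [List.getD_eq_getElem?_getD, List.getElem?_modify]
  by_cases hij : i = j
  · subst hij
    rw [List.getElem?_eq_getElem hlen]
    simp only [Option.map_eq_map, Option.map_some, if_pos rfl, Option.getD_some]
    have hx : X[i] = X.getD i (0, 0) := by
      rw [List.getD_eq_getElem?_getD, List.getElem?_eq_getElem hlen]; rfl
    rw [hx, pvPad_getD]
  · rw [if_neg hij]
    have hji : ¬ j = i := fun h => hij h.symm
    have hmap : ((fun a => if j = i then (fun p : Int × Int => (p.1 + 1, if b then p.2 + 1 else p.2)) a else a) <$> X[i]?) = X[i]? := by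
      cases hx : X[i]? with
      | none => simp
      | some a => simp [hji]
    rw [hmap, ← List.getD_eq_getElem?_getD, pvPad_getD]
lemma pvRowAdd_cons (c : String) (r : List String) (i : Nat) :
    pvRowAdd (c :: r) (i + 1) = pvRowAdd r i := by
  simp [pvRowAdd, pvTotP, pvNumP, pvCell, List.getD_cons_succ, Nat.succ_lt_succ_iff]

lemma pvRowAdd_nil (i : Nat) : pvRowAdd ([] : List String) i = ((0 : Int), (0 : Int)) := by
  simp [pvRowAdd, pvTotP, pvNumP]

lemma pvProcRow_aux (r : List String) (T : List (Int × Int)) (k j : Nat) :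
    ((r.foldl (fun (s : List (Int × Int) × Nat) c =>
      (if ¬ (PySem.Chars.strip c.toList).isEmpty then
         pvBump s.1 s.2 (pvIsNumeric (PySem.Chars.strip c.toList))
       else s.1, s.2 + 1)) (T, k)).1).getD j (0, 0)
    = T.getD j (0, 0) + (if k ≤ j then pvRowAdd r (j - k) else ((0 : Int), (0 : Int))) := by
  induction r generalizing T k with
  | nil => simp [pvRowAdd_nil]
  | cons c r ih =>
    simp only [List.foldl_cons]
    by_cases hc : (PySem.Chars.strip c.toList).isEmpty
    · rw [if_neg (by simpa using hc)]
      rw [ih]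
      congr 1
      rcases Nat.lt_trichotomy j k with h | h | h
      · rw [if_neg (by omega), if_neg (by omega)]
      · subst h
        rw [if_neg (by omega), if_pos (le_refl j), Nat.sub_self]
        have : pvTotP 0 (c :: r) = false := by
          simp [pvTotP, pvCell, List.isEmpty_iff.mp hc]
        simp [pvRowAdd, this, pvNumP]
      · rw [if_pos (by omega), if_pos (by omega)]
        rw [show j - k = (j - (k + 1)) + 1 by omega, pvRowAdd_cons]
    · rw [if_pos (by simpa using hc)]
      rw [ih]
      rw [pvBump_getD]
      rcases Nat.lt_trichotomy j k with h | h | h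
      · rw [if_neg (show ¬ j = k by omega), if_neg (show ¬ (k + 1 ≤ j) by omega),
          if_neg (show ¬ (k ≤ j) by omega)]
      · rw [if_pos h, if_neg (show ¬ (k + 1 ≤ j) by omega), if_pos (show k ≤ j by omega),
          show j - k = 0 by omega]
        have hT : pvTotP 0 (c :: r) = true := by
          simp [pvTotP, pvCell]
          simpa [List.isEmpty_iff] using hc
        have hCell : pvCell (c :: r) 0 = PySem.Chars.strip c.toList := rfl
        subst h
        simp only [pvRowAdd, hT, pvNumP, hCell, if_true, Bool.true_and]
        by_cases hn : pvIsNumeric (PySem.Chars.strip c.toList)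
        · simp only [hn, if_true]
          apply Prod.ext <;> simp
        · simp only [hn, if_false]
          apply Prod.ext <;> simp
      · rw [if_neg (show ¬ j = k by omega), if_pos (show k + 1 ≤ j by omega),
          if_pos (show k ≤ j by omega)]
        rw [show j - k = (j - (k + 1)) + 1 by omega, pvRowAdd_cons]

lemma pvProcRow_getD (T : List (Int × Int)) (r : List String) (j : Nat) :
    (pvProcRow T r).getD j (0, 0) = T.getD j (0, 0) + pvRowAdd r j := by
  unfold pvProcRow
  rw [pvProcRow_aux]
  simp

lemma pvTallies_getD (R : List (List String)) (T : List (Int × Int)) (j : Nat) :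
    (R.foldl pvProcRow T).getD j (0, 0) = T.getD j (0, 0) + ((pvTot R j : Int), (pvNum R j : Int)) := by
  induction R generalizing T with
  | nil => simp [pvTot, pvNum]
  | cons r R ih =>
    simp only [List.foldl_cons]
    rw [ih, pvProcRow_getD]
    simp only [pvTot, pvNum, List.countP_cons, pvRowAdd, Prod.ext_iff]
    constructor <;> by_cases hT : pvTotP j r <;> by_cases hN : pvNumP j r <;>
      simp [hT, hN, Prod.ext_iff] <;> push_cast <;> ring
lemma pvTallies_getD_nil (R : List (List String)) (j : Nat) :
    (R.foldl pvProcRow []).getD j (0, 0) = ((pvTot R j : Int), (pvNum R j : Int)) := by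
  rw [pvTallies_getD]
  apply Prod.ext <;> simp

lemma pvBCount_eq (R : List (List String)) :
    pvBCount (R.foldl pvProcRow [])
      = ((List.range (R.foldl pvProcRow []).length).countP
          (fun j => decide (0 < pvTot R j ∧ pvTot R j ≤ 2 * pvNum R j)) : Int) := by
  have hmap : R.foldl pvProcRow []
      = (List.range (R.foldl pvProcRow []).length).map
          (fun j => ((pvTot R j : Int), (pvNum R j : Int))) := by
    apply List.ext_getElem
    · simp
    · intro i h1 h2
      rw [List.getElem_map, List.getElem_range]
      have hx : (R.foldl pvProcRow [])[i] = (R.foldl pvProcRow []).getD i (0, 0) := by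
        rw [List.getD_eq_getElem?_getD, List.getElem?_eq_getElem h1]; rfl
      rw [hx, pvTallies_getD_nil]
  unfold pvBCount
  conv_lhs => rw [hmap]
  rw [List.foldl_map]
  rw [PySem.List.foldl_ite_add_one
    (fun j => ((pvTot R j : Int), (pvNum R j : Int)).1 > 0 ∧
      2 * ((pvTot R j : Int), (pvNum R j : Int)).2 ≥ ((pvTot R j : Int), (pvNum R j : Int)).1)
    (List.range (R.foldl pvProcRow []).length) 0]
  norm_num
  congr 1
  funext j
  congr 1
  exact decide_eq_decide.mpr (by omega)

lemma pvCountP_range_aux (p : Nat → Bool) (a b : Nat) (hab : a ≤ b)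
    (ha : ∀ j, a ≤ j → p j = false) :
    (List.range b).countP p = (List.range a).countP p := by
  induction b, hab using Nat.le_induction with
  | base => rfl
  | succ n hn ih =>
    rw [List.range_succ, List.countP_append, ih]
    simp [ha n hn]

lemma pvCountP_range_ext (p : Nat → Bool) (a b : Nat)
    (ha : ∀ j, a ≤ j → p j = false) (hb : ∀ j, b ≤ j → p j = false) :
    (List.range a).countP p = (List.range b).countP p := by
  rcases le_total a b with h | h
  · rw [pvCountP_range_aux p a b h ha]
  · rw [pvCountP_range_aux p b a h hb]

lemma pvMain_counts (R : List (List String)) :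
    pvACount R ((PySem.List.max? (R.map (fun r => (r.length : Int))) (fun x => x)).getD 0)
      = pvBCount (R.foldl pvProcRow []) := by
  set mc := (PySem.List.max? (R.map (fun r => (r.length : Int))) (fun x => x)).getD 0 with hmc
  have hfacts : 0 ≤ mc ∧ ∀ r ∈ R, (r.length : Int) ≤ mc := by
    rw [hmc]
    cases hm : PySem.List.max? (R.map (fun r => (r.length : Int))) (fun x => x) with
    | none =>
      have hnil : R.map (fun r => (r.length : Int)) = [] := by
        rwa [PySem.List.max?_eq_none_iff] at hm
      have : R = [] := by simpa using hnil
      subst this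
      simp
    | some m =>
      have hmax := PySem.List.max?_isMax hm
      have hmem := PySem.List.max?_mem hm
      rcases List.mem_map.mp hmem with ⟨r0, _, hr0⟩
      refine ⟨by simp [← hr0], ?_⟩
      intro r hr
      simpa using hmax _ (List.mem_map.mpr ⟨r, hr, rfl⟩)
  obtain ⟨hmc0, hbound⟩ := hfacts
  rw [show mc = ((mc.toNat : Nat) : Int) by omega]
  rw [pvACount_eq, pvBCount_eq]
  have hML : ∀ j, mc.toNat ≤ j →
      (decide (0 < pvTot R j ∧ pvTot R j ≤ 2 * pvNum R j)) = false := by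
    intro j hj
    have htot : pvTot R j = 0 := by
      apply List.countP_eq_zero.mpr
      intro r hr
      have := hbound r hr
      simp only [pvTotP, Bool.and_eq_true, decide_eq_true_eq]
      intro hcon
      omega
    simp [htot]
  have hLL : ∀ j, (R.foldl pvProcRow []).length ≤ j →
      (decide (0 < pvTot R j ∧ pvTot R j ≤ 2 * pvNum R j)) = false := by
    intro j hj
    have h := pvTallies_getD_nil R j
    rw [List.getD_eq_getElem?_getD, List.getElem?_eq_none hj] at h
    have htot : pvTot R j = 0 := by
      have := congrArg Prod.fst h
      simpa using this.symm
    simp [htot]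
  exact_mod_cast congrArg Nat.cast
    (pvCountP_range_ext (fun j => decide (0 < pvTot R j ∧ pvTot R j ≤ 2 * pvNum R j))
      mc.toNat (R.foldl pvProcRow []).length hML hLL)

-- ===== VERDICT (by name: the statement is the Claim_ definition above) =====
theorem meets_content_threshold_spec : Claim_equal_meets_content_threshold := by
  intro table mdr mnc _
  unfold Spec_meets_content_threshold
  simp only [meets_content_threshold, meets_content_threshold_alt]
  split_ifs with h1 h2
  · rfl
  · rfl
  · rw [pvMain_counts]
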